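-- pv_equiv track=rewrite | github.com/AlexaGutieMora/IA_P3 | Practica2/012_DistributionOfInitialRuns.py | distribuir_runs
-- ===== SOURCE A (Python) =====
-- def distribuir_runs(arr):
--     tapes = [[], []]
--     run, idx = [arr[0]], 0
--
--     for i in range(1, len(arr)):
--         if arr[i] >= arr[i - 1]:
--             run.append(arr[i])
--         else:
--             tapes[idx].append(run)
--             run = [arr[i]]
--             idx ^= 1  #Alterna entre 0 y 1
--     tapes[idx].append(run)
--     return tapes
-- ===== SOURCE B (Python) =====
-- def distribuir_runs(arr):
--     # phase 1: collect the ascending runs in order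
--     runs = []
--     cur = [arr[0]]
--     for x in arr[1:]:
--         if x >= cur[-1]:
--             cur.append(x)
--         else:
--             runs.append(cur)
--             cur = [x]
--     runs.append(cur)
--     # phase 2: distribute by parity of the run index
--     return [runs[0::2], runs[1::2]]
-- ===== Notes on version B (the rewrite author's own statement) =====
-- stated objective: simpler
-- what changed: B separates the work into two phases: first collect the flat list of ascending runs, then distribute them onto the two tapes by parity slices (even-indexed runs to tape 0, odd-indexed to tape 1), replacing A's interleaved toggle-index state machine.
import Mathlib
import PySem

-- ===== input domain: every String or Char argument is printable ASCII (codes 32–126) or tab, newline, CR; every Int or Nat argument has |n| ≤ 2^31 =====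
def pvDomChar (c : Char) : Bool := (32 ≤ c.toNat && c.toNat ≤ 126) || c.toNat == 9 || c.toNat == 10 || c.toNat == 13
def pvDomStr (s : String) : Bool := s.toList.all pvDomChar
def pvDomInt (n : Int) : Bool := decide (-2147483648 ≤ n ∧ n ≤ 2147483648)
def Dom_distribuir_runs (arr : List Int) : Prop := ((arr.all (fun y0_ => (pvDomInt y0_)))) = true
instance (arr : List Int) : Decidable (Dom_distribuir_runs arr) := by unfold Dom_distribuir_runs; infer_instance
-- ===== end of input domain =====

-- B splits A's toggle-index state machine into two phases: collect the runs, then slice by parity.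


-- ===== PORT A =====
-- the loop over i in range(1, len(arr)) walks adjacent pairs: state = (tape0, tape1, run, idx)
def pvALoop (prev : Int) (rest : List Int) (t0 t1 : List (List Int)) (run : List Int) (idx : Int) :
    List (List (List Int)) :=
  match rest with
  | [] => if idx = 0 then [t0 ++ [run], t1] else [t0, t1 ++ [run]]   -- tapes[idx].append(run); return tapes
  | x :: xs =>
    if x ≥ prev then pvALoop x xs t0 t1 (run ++ [x]) idx
    else if idx = 0 then pvALoop x xs (t0 ++ [run]) t1 [x] 1         -- idx ^= 1
    else pvALoop x xs t0 (t1 ++ [run]) [x] 0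

def distribuir_runs (arr : List Int) : List (List (List Int)) :=
  match arr with
  | [] => []                  -- Python raises IndexError on the empty list (initial element access); excluded by Pre_
  | a :: rest => pvALoop a rest [] [] [a] 0

-- ===== PORT B =====
-- phase 1: collect the ascending runs (cur's last element is the previous element)
def pvRunsOf (prev : Int) (rest : List Int) (cur : List Int) (acc : List (List Int)) :
    List (List Int) :=
  match rest with
  | [] => acc ++ [cur]
  | x :: xs =>
    if x ≥ prev then pvRunsOf x xs (cur ++ [x]) acc
    else pvRunsOf x xs [x] (acc ++ [cur])

-- phase 2: the even-indexed and odd-indexed slices (step-2 slices), ported by hand (exact)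
mutual
def pvEvens {α : Type} : List α → List α
  | [] => []
  | x :: xs => x :: pvOdds xs
def pvOdds {α : Type} : List α → List α
  | [] => []
  | _ :: xs => pvEvens xs
end

def distribuir_runs_alt (arr : List Int) : List (List (List Int)) :=
  match arr with
  | [] => []                  -- Python raises IndexError on the empty list (initial element access); excluded by Pre_
  | a :: rest =>
    let runs := pvRunsOf a rest [a] []
    [pvEvens runs, pvOdds runs]

-- ===== PRECONDITION & SPEC =====
-- Pre_ excludes only the empty list, on which A (and B) raise IndexError at the initial element access.
def Pre_distribuir_runs (arr : List Int) : Prop := arr ≠ []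
instance (arr : List Int) : Decidable (Pre_distribuir_runs arr) := by unfold Pre_distribuir_runs; infer_instance
def pvWitness_distribuir_runs : List Int := ([3, 1, 2] : List Int)
def Spec_distribuir_runs (arr : List Int) (out : List (List (List Int))) : Prop := out = distribuir_runs_alt arr
instance (arr : List Int) (out : List (List (List Int))) : Decidable (Spec_distribuir_runs arr out) := by unfold Spec_distribuir_runs; infer_instance

-- ===== CLAIM (what is proved, stated in full; the proofs are below) =====
def Claim_equal_distribuir_runs : Prop := ∀ (arr : List Int), Dom_distribuir_runs arr → Pre_distribuir_runs arr → Spec_distribuir_runs arr (distribuir_runs arr)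

-- ===== LEMMAS AND PROOFS =====

theorem pvRunsOf_acc (rest : List Int) : ∀ (prev : Int) (cur : List Int) (acc : List (List Int)),
    pvRunsOf prev rest cur acc = acc ++ pvRunsOf prev rest cur [] := by
  induction rest with
  | nil => intro p c a; simp [pvRunsOf]
  | cons x xs ih =>
    intro p c a
    simp only [pvRunsOf]
    by_cases h : x ≥ p
    · simp only [if_pos h]
      rw [ih x (c ++ [x]) a]
    · simp only [if_neg h, List.nil_append]
      rw [ih x [x] (a ++ [c]), ih x [x] [c]]
      simp

theorem pvALoop_eq (rest : List Int) : ∀ (prev : Int) (t0 t1 : List (List Int)) (run : List Int) (idx : Int),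
    pvALoop prev rest t0 t1 run idx =
      if idx = 0 then
        [t0 ++ pvEvens (pvRunsOf prev rest run []), t1 ++ pvOdds (pvRunsOf prev rest run [])]
      else
        [t0 ++ pvOdds (pvRunsOf prev rest run []), t1 ++ pvEvens (pvRunsOf prev rest run [])] := by
  induction rest with
  | nil =>
    intro p t0 t1 run idx
    by_cases h : idx = 0 <;> simp [pvALoop, pvRunsOf, pvEvens, pvOdds, h]
  | cons x xs ih =>
    intro p t0 t1 run idx
    simp only [pvALoop, pvRunsOf]
    by_cases hx : x ≥ p
    · simp only [if_pos hx]
      exact ih x t0 t1 (run ++ [x]) idx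
    · simp only [if_neg hx]
      rw [pvRunsOf_acc xs x [x] ([] ++ [run])]
      by_cases h : idx = 0
      · simp only [if_pos h]
        rw [ih x (t0 ++ [run]) t1 [x] 1]
        simp [pvEvens, pvOdds]
      · simp only [if_neg h]
        rw [ih x t0 (t1 ++ [run]) [x] 0]
        simp [pvEvens, pvOdds]

-- ===== VERDICT (by name: the statement is the Claim_ definition above) =====
theorem distribuir_runs_spec : Claim_equal_distribuir_runs := by
  intro arr _ hpre
  unfold Spec_distribuir_runs
  match arr with
  | [] => exact absurd rfl hpre
  | a :: rest =>
    simp [distribuir_runs, distribuir_runs_alt, pvALoop_eq]
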